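-- pv_equiv track=rewrite | github.com/asistentes-mugiwara/mugiwara-control-panel | scripts/write-cronjobs-status.py | _derive_status
-- ===== SOURCE A (Python) =====
-- from typing import Mapping, Sequence
--
-- FAILED_STATUSES: frozenset[str] = frozenset({'error', 'failed', 'fail'})
--
-- DEGRADED_STATUSES: frozenset[str] = frozenset({'warn', 'warning', 'stale', 'dirty', 'diverged'})
--
-- def _derive_status(jobs: Sequence[Mapping[str, str]]) -> str:
--     if not jobs:
--         return 'warning'
--
--     critical_jobs = [job for job in jobs if job.get('criticality') == 'critical']
--     if any(job.get('last_status') in FAILED_STATUSES for job in critical_jobs):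
--         return 'failed'
--     if any(not job.get('last_run_at') or job.get('last_status') == 'unknown' for job in critical_jobs):
--         return 'warning'
--     if any(job.get('last_status') in DEGRADED_STATUSES for job in jobs):
--         return 'warning'
--     if any(job.get('last_status') in FAILED_STATUSES for job in jobs):
--         return 'warning'
--     return 'success'
-- ===== SOURCE B (Python) =====
-- from typing import Mapping, Sequence
--
-- FAILED_STATUSES: frozenset[str] = frozenset({'error', 'failed', 'fail'})
--
-- DEGRADED_STATUSES: frozenset[str] = frozenset({'warn', 'warning', 'stale', 'dirty', 'diverged'})
--
-- def _derive_status(jobs: Sequence[Mapping[str, str]]) -> str: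
--     if not jobs:
--         return 'warning'
--     critical_failed = False
--     critical_incomplete = False
--     any_degraded = False
--     any_failed = False
--     for job in jobs:
--         crit = job.get('criticality') == 'critical'
--         st = job.get('last_status')
--         failed = st in FAILED_STATUSES
--         if crit and failed:
--             critical_failed = True
--         if crit and (not job.get('last_run_at') or st == 'unknown'):
--             critical_incomplete = True
--         if st in DEGRADED_STATUSES:
--             any_degraded = True
--         if failed:
--             any_failed = True
--     if critical_failed:
--         return 'failed'
--     if critical_incomplete or any_degraded or any_failed:
--         return 'warning'
--     return 'success'
-- ===== Notes on version B (the rewrite author's own statement) =====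
-- stated objective: alternative
-- what changed: Replaces the critical-jobs filter list plus four separate any() scans with a single pass over jobs that accumulates four boolean flags and decides the status from them afterwards.
import Mathlib
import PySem

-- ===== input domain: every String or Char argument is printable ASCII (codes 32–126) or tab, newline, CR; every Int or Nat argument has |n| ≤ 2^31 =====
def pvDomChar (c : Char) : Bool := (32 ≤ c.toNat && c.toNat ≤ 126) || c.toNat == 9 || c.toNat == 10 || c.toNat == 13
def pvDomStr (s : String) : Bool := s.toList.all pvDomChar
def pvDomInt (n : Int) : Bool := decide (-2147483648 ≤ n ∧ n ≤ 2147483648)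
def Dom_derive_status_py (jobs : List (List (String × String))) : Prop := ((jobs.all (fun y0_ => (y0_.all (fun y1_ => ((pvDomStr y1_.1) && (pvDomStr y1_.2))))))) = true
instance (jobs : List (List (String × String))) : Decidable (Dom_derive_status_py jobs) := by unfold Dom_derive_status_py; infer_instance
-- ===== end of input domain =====

-- B replaces A's critical-jobs filter plus four any() scans by one loop over jobs accumulating four boolean flags (alternative decomposition, same cost).


-- ===== PORT A =====
-- shared module constants
def pvFAILED_STATUSES : List String := ["error", "failed", "fail"]
def pvDEGRADED_STATUSES : List String := ["warn", "warning", "stale", "dirty", "diverged"]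
-- job.get(k): dict as association list, first match (Python dicts have unique keys)
def pvJobGet (job : List (String × String)) (k : String) : Option String :=
  (job.find? (fun p => p.1 == k)).map (·.2)
-- 'v in FROZENSET' where v may be None (None is never a member)
def pvOptMem (v : Option String) (s : List String) : Bool :=
  match v with | some x => s.contains x | none => false
-- 'not v' for an Optional[str]: None and '' are falsy
def pvFalsy (v : Option String) : Bool :=
  match v with | some x => x == "" | none => true

def derive_status_py (jobs : List (List (String × String))) : String :=
  if jobs = [] then "warning"
  else
    let critical_jobs := jobs.filter (fun job => pvJobGet job "criticality" == some "critical")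
    if critical_jobs.any (fun job => pvOptMem (pvJobGet job "last_status") pvFAILED_STATUSES) then "failed"
    else if critical_jobs.any (fun job => pvFalsy (pvJobGet job "last_run_at") || pvJobGet job "last_status" == some "unknown") then "warning"
    else if jobs.any (fun job => pvOptMem (pvJobGet job "last_status") pvDEGRADED_STATUSES) then "warning"
    else if jobs.any (fun job => pvOptMem (pvJobGet job "last_status") pvFAILED_STATUSES) then "warning"
    else "success"

-- ===== PORT B =====
-- one pass: (critical_failed, critical_incomplete, any_degraded, any_failed)
def pvStep (acc : Bool × Bool × Bool × Bool) (job : List (String × String)) : Bool × Bool × Bool × Bool :=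
  let crit := pvJobGet job "criticality" == some "critical"
  let st := pvJobGet job "last_status"
  let failed := pvOptMem st pvFAILED_STATUSES
  ( acc.1 || (crit && failed),
    acc.2.1 || (crit && (pvFalsy (pvJobGet job "last_run_at") || st == some "unknown")),
    acc.2.2.1 || pvOptMem st pvDEGRADED_STATUSES,
    acc.2.2.2 || failed )

def derive_status_py_alt (jobs : List (List (String × String))) : String :=
  if jobs = [] then "warning"
  else
    let flags := jobs.foldl pvStep (false, false, false, false)
    if flags.1 then "failed"
    else if flags.2.1 || flags.2.2.1 || flags.2.2.2 then "warning"
    else "success"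

-- ===== PRECONDITION & SPEC =====
def Spec_derive_status_py (jobs : List (List (String × String))) (out : String) : Prop := out = derive_status_py_alt jobs
instance (jobs : List (List (String × String))) (out : String) : Decidable (Spec_derive_status_py jobs out) := by unfold Spec_derive_status_py; infer_instance

-- ===== CLAIM (what is proved, stated in full; the proofs are below) =====
def Claim_equal_derive_status_py : Prop := ∀ (jobs : List (List (String × String))), Dom_derive_status_py jobs → Spec_derive_status_py jobs (derive_status_py jobs)

-- ===== LEMMAS AND PROOFS =====
theorem pvFoldl_flags (jobs : List (List (String × String))) (a b c d : Bool) :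
    jobs.foldl pvStep (a, b, c, d) =
      ( a || jobs.any (fun job => (pvJobGet job "criticality" == some "critical") && pvOptMem (pvJobGet job "last_status") pvFAILED_STATUSES),
        b || jobs.any (fun job => (pvJobGet job "criticality" == some "critical") && (pvFalsy (pvJobGet job "last_run_at") || pvJobGet job "last_status" == some "unknown")),
        c || jobs.any (fun job => pvOptMem (pvJobGet job "last_status") pvDEGRADED_STATUSES),
        d || jobs.any (fun job => pvOptMem (pvJobGet job "last_status") pvFAILED_STATUSES) ) := by
  induction jobs generalizing a b c d with
  | nil => simp
  | cons j t ih =>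
    simp only [List.foldl_cons, List.any_cons, pvStep]
    rw [ih]
    simp [Bool.or_assoc]

theorem pvAny_filter_crit (jobs : List (List (String × String))) (q : List (String × String) → Bool) :
    (jobs.filter (fun job => pvJobGet job "criticality" == some "critical")).any q =
      jobs.any (fun job => (pvJobGet job "criticality" == some "critical") && q job) := by
  induction jobs with
  | nil => rfl
  | cons j t ih =>
    by_cases h : (pvJobGet j "criticality" == some "critical") = true <;>
      simp [h, ih]

theorem pvBranch_eq (p1 p2 p3 p4 : Bool) :
    (if p1 = true then "failed"
     else if p2 = true then "warning"
     else if p3 = true then "warning"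
     else if p4 = true then "warning"
     else "success") =
    (if p1 = true then "failed"
     else if (p2 || p3 || p4) = true then "warning"
     else "success") := by
  cases p1 <;> cases p2 <;> cases p3 <;> cases p4 <;> rfl

-- ===== VERDICT (by name: the statement is the Claim_ definition above) =====
theorem derive_status_py_spec : Claim_equal_derive_status_py := by
  intro jobs _
  unfold Spec_derive_status_py derive_status_py derive_status_py_alt
  by_cases hnil : jobs = []
  · simp [hnil]
  · simp only [hnil, if_false]
    rw [pvFoldl_flags, pvAny_filter_crit, pvAny_filter_crit]
    simp only [Bool.false_or]
    exact pvBranch_eq _ _ _ _
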